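-- pv_equiv track=rewrite | github.com/saikumaryerra/webscrape | fetcher.py | _is_recipe_url
-- ===== SOURCE A (Python) =====
-- def _is_recipe_url(url, base_url):
--     """Check if a URL looks like a recipe page (not a category/tag/archive)."""
--     path = url.replace(base_url, "").strip("/")
--     if not path:
--         return False
--     skip_words = [
--         "category", "tag", "page", "author", "wp-content",
--         "recipes", "about", "contact", "privacy", "disclaimer",
--         "sitemap", "feed",
--     ]
--     skip_extensions = (".xml", ".jpg", ".png", ".gif", ".css", ".js")
--     path_lower = path.lower()
--     if path_lower in skip_words:
--         return False
--     if any(path_lower.startswith(w + "/") for w in skip_words):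
--         return False
--     if any(path_lower.endswith(ext) for ext in skip_extensions):
--         return False
--     # Recipe URLs are typically single-level paths like /palak-paneer-recipe/
--     if "/" in path:
--         return False
--     return True
-- ===== SOURCE B (Python) =====
-- _SKIP_WORDS = frozenset([
--     "category", "tag", "page", "author", "wp-content",
--     "recipes", "about", "contact", "privacy", "disclaimer",
--     "sitemap", "feed",
-- ])
-- _SKIP_EXTENSIONS = frozenset([".xml", ".jpg", ".png", ".gif", ".css", ".js"])
--
--
-- def _is_recipe_url(url, base_url):
--     """Check if a URL looks like a recipe page (not a category/tag/archive)."""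
--     # One pass over the characters: collect the single path segment, rejecting
--     # as soon as a second segment starts ('/' after some segment chars, then a
--     # non-'/' char).  This replaces strip('/') plus the substring/prefix scans.
--     seg_chars = []
--     ended = False
--     for ch in url.replace(base_url, ""):
--         if ch == "/":
--             ended = ended or bool(seg_chars)
--         elif ended:
--             return False
--         else:
--             seg_chars.append(ch)
--     if not seg_chars:
--         return False
--     seg = "".join(seg_chars).lower()
--     if seg in _SKIP_WORDS:
--         return False
--     dot = seg.rfind(".")
--     return dot == -1 or seg[dot:] not in _SKIP_EXTENSIONS
-- ===== Notes on version B (the rewrite author's own statement) =====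
-- stated objective: alternative
-- what changed: Replaces strip('/') plus the in/startswith/endswith substring scans by a single character-level pass (state machine collecting the unique path segment and rejecting on a second segment) followed by one set lookup and an extension extracted once via rfind('.') and tested by set membership instead of a loop of endswith calls.
import Mathlib
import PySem

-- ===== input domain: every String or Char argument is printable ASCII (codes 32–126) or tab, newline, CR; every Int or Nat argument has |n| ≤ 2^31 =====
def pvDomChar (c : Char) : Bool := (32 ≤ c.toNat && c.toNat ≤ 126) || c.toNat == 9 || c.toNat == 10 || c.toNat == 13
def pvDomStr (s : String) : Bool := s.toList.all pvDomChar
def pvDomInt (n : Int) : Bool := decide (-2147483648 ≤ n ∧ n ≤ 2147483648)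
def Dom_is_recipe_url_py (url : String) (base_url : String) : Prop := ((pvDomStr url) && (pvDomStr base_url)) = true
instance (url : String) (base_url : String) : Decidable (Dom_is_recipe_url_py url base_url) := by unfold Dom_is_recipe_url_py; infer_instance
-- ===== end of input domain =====

-- B replaces A's strip('/') + substring/prefix/suffix scans by a single character-level pass (a small state machine collecting the unique
-- path segment) plus one set lookup and an extension extracted once via rfind('.'); alternative decomposition, same results.


-- ===== PORT A =====
def is_recipe_url_py (url : String) (base_url : String) : Bool :=
  let path := PySem.Str.stripChars (PySem.Str.replace url base_url "") "/"
  if path = "" then false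
  else
    let skip_words : List String :=
      ["category", "tag", "page", "author", "wp-content",
       "recipes", "about", "contact", "privacy", "disclaimer",
       "sitemap", "feed"]
    let skip_extensions : List String := [".xml", ".jpg", ".png", ".gif", ".css", ".js"]
    let path_lower := PySem.Str.lower path
    if skip_words.contains path_lower then false
    else if skip_words.any (fun w => PySem.Str.startswith path_lower (w ++ "/")) then false
    else if skip_extensions.any (fun ext => PySem.Str.endswith path_lower ext) then false
    else if PySem.Str.isIn "/" path then false
    else true

-- ===== PORT B =====
-- the one-pass scanner of Source B: collect the chars of the single path segment;
-- 'none' = Source B's early 'return False' (a second segment started)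
def pvScan : List Char → List Char → Bool → Option (List Char)
  | [], seg, _ => some seg
  | c :: rest, seg, ended =>
    if c = '/' then pvScan rest seg (ended || !seg.isEmpty)
    else if ended then none
    else pvScan rest (seg ++ [c]) ended

def pvSkipWords : List (List Char) :=
  [['c', 'a', 't', 'e', 'g', 'o', 'r', 'y'],
   ['t', 'a', 'g'],
   ['p', 'a', 'g', 'e'],
   ['a', 'u', 't', 'h', 'o', 'r'],
   ['w', 'p', '-', 'c', 'o', 'n', 't', 'e', 'n', 't'],
   ['r', 'e', 'c', 'i', 'p', 'e', 's'],
   ['a', 'b', 'o', 'u', 't'],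
   ['c', 'o', 'n', 't', 'a', 'c', 't'],
   ['p', 'r', 'i', 'v', 'a', 'c', 'y'],
   ['d', 'i', 's', 'c', 'l', 'a', 'i', 'm', 'e', 'r'],
   ['s', 'i', 't', 'e', 'm', 'a', 'p'],
   ['f', 'e', 'e', 'd']]

def pvSkipExts : List (List Char) :=
  [['.', 'x', 'm', 'l'],
   ['.', 'j', 'p', 'g'],
   ['.', 'p', 'n', 'g'],
   ['.', 'g', 'i', 'f'],
   ['.', 'c', 's', 's'],
   ['.', 'j', 's']]

def is_recipe_url_py_alt (url : String) (base_url : String) : Bool :=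
  match pvScan (PySem.Str.replace url base_url "").toList [] false with
  | none => false
  | some segChars =>
    if segChars.isEmpty then false
    else
      let seg := PySem.Chars.lower segChars
      if PySem.Set.contains (PySem.Set.ofList pvSkipWords) seg then false
      else
        let dot := PySem.Chars.rfind seg ['.']
        decide (dot = -1) ||
          !(PySem.Set.contains (PySem.Set.ofList pvSkipExts)
              (PySem.Chars.slice seg (some dot) none))

-- ===== PRECONDITION & SPEC =====
def Spec_is_recipe_url_py (url : String) (base_url : String) (out : Bool) : Prop := out = is_recipe_url_py_alt url base_url
instance (url : String) (base_url : String) (out : Bool) : Decidable (Spec_is_recipe_url_py url base_url out) := by unfold Spec_is_recipe_url_py; infer_instance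

-- ===== CLAIM (what is proved, stated in full; the proofs are below) =====
def Claim_equal_is_recipe_url_py : Prop := ∀ (url : String) (base_url : String), Dom_is_recipe_url_py url base_url → Spec_is_recipe_url_py url base_url (is_recipe_url_py url base_url)

-- ===== LEMMAS AND PROOFS =====

def pvP : Char → Bool := fun c => (['/'] : List Char).contains c
def pvRs (t : List Char) : List Char := (List.dropWhile pvP t.reverse).reverse



theorem pvRs_eq_nil_iff (t : List Char) : pvRs t = [] ↔ ∀ c ∈ t, c = '/' := by
  unfold pvRs
  rw [List.reverse_eq_nil_iff, List.dropWhile_eq_nil_iff]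
  constructor
  · intro h c hc
    have := h c (List.mem_reverse.mpr hc)
    simpa [pvP] using this
  · intro h c hc
    have := h c (List.mem_reverse.mp hc)
    simp [pvP, this]
theorem pvRs_cons (c : Char) (t : List Char) :
    pvRs (c :: t) = if pvRs t = [] then (if pvP c then [] else [c]) else c :: pvRs t := by
  unfold pvRs
  rw [List.reverse_cons, List.dropWhile_append]
  by_cases h : List.dropWhile pvP t.reverse = []
  · simp [h]
    by_cases hc : pvP c <;> simp [hc, List.dropWhile]
  · simp [h, List.isEmpty_iff]

theorem pvScan_true (t : List Char) (seg : List Char) :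
    pvScan t seg true = if (∀ c ∈ t, c = '/') then some seg else none := by
  induction t with
  | nil => simp [pvScan]
  | cons c rest ih =>
    by_cases hc : c = '/'
    · simp [pvScan, hc, ih]
    · simp [pvScan, hc]

theorem pvScan_false (t : List Char) (seg : List Char) (h : seg ≠ []) :
    pvScan t seg false = if '/' ∈ pvRs t then none else some (seg ++ pvRs t) := by
  induction t generalizing seg with
  | nil => simp [pvScan, pvRs]
  | cons c rest ih =>
    by_cases hc : c = '/'
    · subst hc
      have hne : (!seg.isEmpty) = true := by simp [h]
      rw [show pvScan ('/' :: rest) seg false = pvScan rest seg (false || !seg.isEmpty) from rfl]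
      rw [hne]
      simp only [Bool.or_true]
      rw [pvScan_true]
      rw [pvRs_cons]
      by_cases hall : ∀ c ∈ rest, c = '/'
      · have : pvRs rest = [] := (pvRs_eq_nil_iff rest).mpr hall
        simp [this, pvP]
        exact hall
      · have hnn : pvRs rest ≠ [] := fun he => hall ((pvRs_eq_nil_iff rest).mp he)
        simp [hall, hnn]
    · rw [show pvScan (c :: rest) seg false = pvScan rest (seg ++ [c]) false from by simp [pvScan, hc]]
      rw [ih _ (by simp)]
      rw [pvRs_cons]
      by_cases hn : pvRs rest = []
      · simp [hn, pvP, hc, Ne.symm hc]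
      · have : ('/' ∈ c :: pvRs rest) = ('/' ∈ pvRs rest) := by
          simp [List.mem_cons, Ne.symm hc]
        simp [hn, this]

theorem stripChars_slash (t : List Char) :
    PySem.Chars.stripChars t ['/'] = pvRs (List.dropWhile pvP t) := by
  have pvP_eq : pvP = fun c => decide (c = '/') := by funext c; simp [pvP]
  simp [PySem.Chars.stripChars, pvRs, pvP_eq]

theorem pvScan_key (t : List Char) :
    pvScan t [] false =
      (if '/' ∈ PySem.Chars.stripChars t ['/'] then none
       else some (PySem.Chars.stripChars t ['/'])) := by
  induction t with
  | nil => simp [pvScan, stripChars_slash, pvRs]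
  | cons c rest ih =>
    by_cases hc : c = '/'
    · subst hc
      rw [show pvScan ('/' :: rest) [] false = pvScan rest [] false from by simp [pvScan]]
      rw [ih, stripChars_slash, stripChars_slash,
        show List.dropWhile pvP ('/' :: rest) = List.dropWhile pvP rest from by simp [List.dropWhile, pvP]]
    · rw [show pvScan (c :: rest) [] false = pvScan rest [c] false from by simp [pvScan, hc]]
      rw [pvScan_false _ _ (by simp), stripChars_slash,
        show List.dropWhile pvP (c :: rest) = c :: rest from by simp [List.dropWhile, pvP, hc]]
      rw [pvRs_cons]
      by_cases hn : pvRs rest = []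
      · simp [hn, pvP, hc, Ne.symm hc]
      · have : ('/' ∈ c :: pvRs rest) = ('/' ∈ pvRs rest) := by
          simp [List.mem_cons, Ne.symm hc]
        simp [hn, this]
theorem singleton_prefix (l : List Char) : ((['.'] : List Char) <+: l) ↔ l.head? = some '.' := by
  cases l with
  | nil => simp
  | cons a t => simp [List.cons_prefix_cons, eq_comm]
theorem hpref (q : List Char) (i : Nat) : (['.'] : List Char).isPrefixOf (q.drop i) = true ↔ q[i]? = some '.' := by
  rw [List.isPrefixOf_iff_prefix, singleton_prefix, List.head?_drop]

theorem rfind_go_spec (q : List Char) (j : Nat) :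
    (PySem.Chars.rfind.go q ['.'] j = -1 ∧ ∀ i ≤ j, q[i]? ≠ some '.') ∨
    (∃ k : Nat, PySem.Chars.rfind.go q ['.'] j = (k : Int) ∧ k ≤ j ∧ q[k]? = some '.' ∧
       ∀ i, k < i → i ≤ j → q[i]? ≠ some '.') := by
  induction j with
  | zero =>
    by_cases h : q[0]? = some '.'
    · right
      refine ⟨0, ?_, le_refl 0, h, by omega⟩
      simp only [PySem.Chars.rfind.go]
      rw [if_pos (by simpa using (hpref q 0).mpr h)]
      rfl
    · left
      constructor
      · simp only [PySem.Chars.rfind.go]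
        rw [if_neg]
        intro hc
        exact h ((hpref q 0).mp (by simpa using hc))
      · intro i hi; interval_cases i; exact h
  | succ j ih =>
    by_cases h : q[j+1]? = some '.'
    · right
      refine ⟨j+1, ?_, le_refl _, h, by omega⟩
      simp only [PySem.Chars.rfind.go]
      rw [if_pos ((hpref q (j+1)).mpr h)]
    · have hstep : PySem.Chars.rfind.go q ['.'] (j+1) = PySem.Chars.rfind.go q ['.'] j := by
        simp only [PySem.Chars.rfind.go]
        rw [if_neg (fun hc => h ((hpref q (j+1)).mp hc))]
      rcases ih with ⟨he, hall⟩ | ⟨k, he, hk, hdot, hnone⟩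
      · left
        refine ⟨hstep ▸ he, fun i hi => ?_⟩
        rcases Nat.lt_or_ge i (j+1) with hlt | hge
        · exact hall i (by omega)
        · have : i = j+1 := by omega
          subst this; exact h
      · right
        refine ⟨k, hstep ▸ he, by omega, hdot, fun i h1 h2 => ?_⟩
        rcases Nat.lt_or_ge i (j+1) with hlt | hge
        · exact hnone i h1 (by omega)
        · have : i = j+1 := by omega
          subst this; exact h

theorem rfind_suffix (q r tail : List Char) (hq : q = r ++ '.' :: tail)
    (htail : '.' ∉ tail) : PySem.Chars.rfind q ['.'] = (r.length : Int) := by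
  have hdotr : q[r.length]? = some '.' := by
    subst hq
    rw [List.getElem?_append_right (le_refl _)]
    simp
  have hlen : q.length = r.length + 1 + tail.length := by subst hq; simp; omega
  have hrle : r.length ≤ q.length := by omega
  show PySem.Chars.rfind.go q ['.'] q.length = (r.length : Int)
  rcases rfind_go_spec q q.length with ⟨he, hall⟩ | ⟨k, he, hk, hdot, hnone⟩
  · exact absurd hdotr (hall r.length hrle)
  · have h1 : r.length ≤ k := by
      by_contra hlt
      exact hnone r.length (by omega) hrle hdotr
    have h2 : ¬ r.length < k := by
      intro hgt
      have : q[k]? = tail[k - r.length - 1]? := by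
        subst hq
        rw [List.getElem?_append_right (by omega)]
        rw [show k - r.length = (k - r.length - 1) + 1 from by omega]
        simp
      rw [this] at hdot
      exact htail (List.mem_of_getElem? hdot)
    have : k = r.length := by omega
    subst this
    exact he


theorem set_contains_ofList_chars (L : List (List Char)) (x : List Char) :
    PySem.Set.contains (PySem.Set.ofList L) x = L.contains x := by
  simp [PySem.Set.mem_ofList]

theorem slice_nonneg (q : List Char) (k : Nat) :
    PySem.Chars.slice q (some (k : Int)) none = List.drop k q := by
  show PySem.List.slice q (some (k : Int)) none = List.drop k q
  rw [PySem.List.slice_from q (by positivity)]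
  simp

theorem ext_case (q e tail : List Char) (he : e = '.' :: tail) (htail : '.' ∉ tail)
    (hmem : pvSkipExts.contains e = true)
    (hend : PySem.Chars.endswith q e = true) :
    (!(decide (PySem.Chars.rfind q ['.'] = -1) ||
        !(PySem.Set.contains (PySem.Set.ofList pvSkipExts)
            (PySem.Chars.slice q (some (PySem.Chars.rfind q ['.'])) none)))) = true := by
  obtain ⟨r, hr⟩ := (PySem.Chars.endswith_iff q e).mp hend
  have hq : q = r ++ '.' :: tail := by rw [← hr, he]
  have hd := rfind_suffix q r tail hq htail
  rw [hd, slice_nonneg]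
  have hdrop : List.drop r.length q = e := by rw [hq, List.drop_left, he]
  rw [hdrop, set_contains_ofList_chars, hmem]
  simp

theorem ext_loop_eq (q : List Char) :
    (pvSkipExts.any (fun e => PySem.Chars.endswith q e)) =
      !(decide (PySem.Chars.rfind q ['.'] = -1) ||
        !(PySem.Set.contains (PySem.Set.ofList pvSkipExts)
            (PySem.Chars.slice q (some (PySem.Chars.rfind q ['.'])) none))) := by
  cases hA : pvSkipExts.any (fun e => PySem.Chars.endswith q e) with
  | true =>
    obtain ⟨e, hmem, hend⟩ := List.any_eq_true.mp hA
    have hmem' : pvSkipExts.contains e = true := by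
      simpa [List.contains_iff_mem] using hmem
    simp only [pvSkipExts, List.mem_cons, List.not_mem_nil, or_false] at hmem
    rcases hmem with h|h|h|h|h|h <;> subst h <;>
      exact (ext_case q _ _ rfl (by decide) hmem' hend).symm
  | false =>
    have hall := List.any_eq_false.mp hA
    by_cases hd : PySem.Chars.rfind q ['.'] = -1
    · simp [hd]
    · rcases rfind_go_spec q q.length with ⟨he, _⟩ | ⟨k, he, _, _, _⟩
      · exact absurd he hd
      · rw [show PySem.Chars.rfind q ['.'] = PySem.Chars.rfind.go q ['.'] q.length from rfl, he]
        rw [slice_nonneg, set_contains_ofList_chars]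
        have hnc : pvSkipExts.contains (List.drop k q) = false := by
          rw [Bool.eq_false_iff]
          intro hcon
          have hin := List.contains_iff_mem.mp hcon
          exact absurd ((PySem.Chars.endswith_iff q _).mpr (List.drop_suffix k q))
            (by simpa using hall _ hin)
        rw [hnc]
        simp
theorem lowerChar_slash (c : Char) (h : PySem.Chars.lowerChar c = '/') : c = '/' := by
  unfold PySem.Chars.lowerChar PySem.Chars.isupper at h
  split at h
  · next hb =>
    exfalso
    have h2 : (Char.ofNat (c.toNat + 32)).toNat = ('/' : Char).toNat := by rw [h]
    simp [Char.le_def, UInt32.le_iff_toNat_le] at hb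
    rw [Char.toNat_ofNat] at h2
    have hv : (c.toNat + 32).isValidChar := by
      left
      show c.toNat + 32 < 55296
      omega
    rw [if_pos hv] at h2
    have h47 : ('/' : Char).toNat = 47 := by decide
    omega
  · exact h

theorem lower_no_slash (p : List Char) (h : '/' ∉ p) : '/' ∉ PySem.Chars.lower p := by
  intro hc
  unfold PySem.Chars.lower at hc
  obtain ⟨c, hcp, hlc⟩ := List.mem_map.mp hc
  exact h (lowerChar_slash c hlc ▸ hcp)

theorem startswith_slash_false (p : String) (w : String)
    (h : '/' ∉ p.toList) :
    PySem.Str.startswith (PySem.Str.lower p) (w ++ "/") = false := by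
  rw [Bool.eq_false_iff]
  intro hsw
  rw [PySem.Str.startswith_eq] at hsw
  have hpre : (w ++ "/").toList <+: (PySem.Str.lower p).toList :=
    (PySem.Chars.startswith_iff _ _).mp hsw
  have hmem : '/' ∈ (PySem.Str.lower p).toList := by
    have hm : '/' ∈ (w ++ "/").toList := by simp [String.toList_append]
    exact hpre.subset hm
  rw [PySem.Str.toList_lower] at hmem
  exact lower_no_slash p.toList h hmem

theorem contains_toList (ws : List String) (L : String) :
    (ws.map String.toList).contains L.toList = ws.contains L := by
  induction ws with
  | nil => rfl
  | cons w t ih =>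
    simp only [List.map_cons, List.contains_cons, ih]
    congr 1
    cases hbe : L.toList == w.toList <;> cases hbe2 : L == w <;> first | rfl | skip
    · exfalso
      have : L.toList = w.toList := by rw [(beq_iff_eq).mp hbe2]
      simp [this] at hbe
    · exfalso
      have : L = w := String.toList_inj.mp (beq_iff_eq.mp hbe)
      simp [this] at hbe2


-- ===== VERDICT (by name: the statement is the Claim_ definition above) =====
set_option maxHeartbeats 1000000 in
theorem is_recipe_url_py_spec : Claim_equal_is_recipe_url_py := by
  intro url base_url _
  show is_recipe_url_py url base_url = is_recipe_url_py_alt url base_url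
  simp only [is_recipe_url_py, is_recipe_url_py_alt]
  set s := PySem.Str.replace url base_url "" with hs
  rw [pvScan_key s.toList]
  set p := PySem.Chars.stripChars s.toList ['/'] with hp
  have htl : (PySem.Str.stripChars s "/").toList = p := by
    rw [PySem.Str.toList_stripChars]; rfl
  by_cases hsl : '/' ∈ p
  · rw [if_pos hsl]
    have hisin : PySem.Str.isIn "/" (PySem.Str.stripChars s "/") = true := by
      rw [PySem.Str.isIn_eq]
      rw [show ("/" : String).toList = ['/'] from rfl, htl]
      rw [PySem.Chars.isIn_iff_infix, List.singleton_infix_iff]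
      exact hsl
    split_ifs <;> rfl
  · rw [if_neg hsl]
    show (if (PySem.Str.stripChars s "/") = "" then false else _) = _
    by_cases hpe : p = []
    · have hP : PySem.Str.stripChars s "/" = "" := String.toList_inj.mp (by rw [htl, hpe]; rfl)
      rw [if_pos hP]
      simp [hpe]
    · have hPne : PySem.Str.stripChars s "/" ≠ "" := fun he => hpe (by rw [← htl, he]; rfl)
      rw [if_neg hPne]
      have hnsl : '/' ∉ (PySem.Str.stripChars s "/").toList := by rw [htl]; exact hsl
      set L := PySem.Str.lower (PySem.Str.stripChars s "/") with hL
      have hq : L.toList = PySem.Chars.lower p := by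
        rw [hL, PySem.Str.toList_lower, htl]
      have hne : p.isEmpty = false := by simp [hpe]
      show _ = (if p.isEmpty = true then (false : Bool) else
        if (PySem.Set.ofList pvSkipWords).contains (PySem.Chars.lower p) = true then false
        else
          decide (PySem.Chars.rfind (PySem.Chars.lower p) ['.'] = -1) ||
            !(PySem.Set.ofList pvSkipExts).contains
                (PySem.Chars.slice (PySem.Chars.lower p)
                  (some (PySem.Chars.rfind (PySem.Chars.lower p) ['.']))))
      rw [if_neg (by simp [hne] : ¬ p.isEmpty = true)]
      have hwords : pvSkipWords = (["category", "tag", "page", "author", "wp-content",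
          "recipes", "about", "contact", "privacy", "disclaimer",
          "sitemap", "feed"] : List String).map String.toList := by decide
      have hcw : PySem.Set.contains (PySem.Set.ofList pvSkipWords) (PySem.Chars.lower p)
          = (["category", "tag", "page", "author", "wp-content",
              "recipes", "about", "contact", "privacy", "disclaimer",
              "sitemap", "feed"] : List String).contains L := by
        rw [set_contains_ofList_chars, ← hq, hwords, contains_toList]
      by_cases hcwv : (["category", "tag", "page", "author", "wp-content",
          "recipes", "about", "contact", "privacy", "disclaimer",
          "sitemap", "feed"] : List String).contains L = true
      · rw [if_pos hcwv, if_pos (by rw [hcw]; exact hcwv)]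
      · rw [if_neg hcwv,
            if_neg (show ¬ (PySem.Set.ofList pvSkipWords).contains (PySem.Chars.lower p) = true
              from by rw [hcw]; exact hcwv)]
        have hsw : (["category", "tag", "page", "author", "wp-content",
            "recipes", "about", "contact", "privacy", "disclaimer",
            "sitemap", "feed"] : List String).any
              (fun w => PySem.Str.startswith L (w ++ "/")) = false := by
          rw [List.any_eq_false]
          intro w _ hbad
          rw [hL, startswith_slash_false (PySem.Str.stripChars s "/") w hnsl] at hbad
          simp at hbad
        rw [hsw]
        simp only [Bool.false_eq_true, if_false]
        have hisin2 : PySem.Chars.isIn ['/'] (PySem.Chars.stripChars s.toList ['/']) = false := by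
          rw [Bool.eq_false_iff]
          intro hc
          exact hsl ((List.singleton_infix_iff _ _).mp ((PySem.Chars.isIn_iff_infix _ _).mp hc))
        have hextA : ([".xml", ".jpg", ".png", ".gif", ".css", ".js"] : List String).any
            (fun ext => PySem.Str.endswith L ext)
            = pvSkipExts.any (fun e => PySem.Chars.endswith (PySem.Chars.lower p) e) := by
          rw [show pvSkipExts = ([".xml", ".jpg", ".png", ".gif", ".css", ".js"] : List String).map
              String.toList from by decide]
          rw [List.any_map]
          apply PySem.List.any_congr_mem
          intro x hx
          rw [PySem.Str.endswith_eq, hq]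
          rfl
        have hY := ext_loop_eq (PySem.Chars.lower p)
        rw [hextA]
        set Y := decide (PySem.Chars.rfind (PySem.Chars.lower p) ['.'] = -1) ||
            !(PySem.Set.ofList pvSkipExts).contains
                (PySem.Chars.slice (PySem.Chars.lower p)
                  (some (PySem.Chars.rfind (PySem.Chars.lower p) ['.']))) with hYdef
        clear_value Y
        rw [hY]
        cases Y with
        | true => simp [hisin2]
        | false => simp
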